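-- pv_equiv track=rewrite | github.com/Omar-Simental/Programas---Python | p110_suma_par_impar.py | suma_pares_impares
-- ===== SOURCE A (Python) =====
-- def suma_pares_impares(ini, fin):
--     sp = 0
--     si = 0
--     pares = []
--     impares = []
--     for i in range(ini, fin+1):
--         if i % 2 == 0 :
--             pares.append(i)
--             sp += i
--         else:
--             impares.append(i)
--             si += i
--     return pares, impares, sp, si
-- ===== SOURCE B (Python) =====
-- def suma_pares_impares(ini, fin):
--     start_even = ini if ini % 2 == 0 else ini + 1
--     start_odd = ini + 1 if ini % 2 == 0 else ini
--     pares = list(range(start_even, fin + 1, 2))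
--     impares = list(range(start_odd, fin + 1, 2))
--     return pares, impares, sum(pares), sum(impares)
-- ===== Notes on version B (the rewrite author's own statement) =====
-- stated objective: faster
-- what changed: Replaces the per-element parity-testing loop by two stride-2 ranges starting at the first even/odd value >= ini, summed directly.
import Mathlib
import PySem

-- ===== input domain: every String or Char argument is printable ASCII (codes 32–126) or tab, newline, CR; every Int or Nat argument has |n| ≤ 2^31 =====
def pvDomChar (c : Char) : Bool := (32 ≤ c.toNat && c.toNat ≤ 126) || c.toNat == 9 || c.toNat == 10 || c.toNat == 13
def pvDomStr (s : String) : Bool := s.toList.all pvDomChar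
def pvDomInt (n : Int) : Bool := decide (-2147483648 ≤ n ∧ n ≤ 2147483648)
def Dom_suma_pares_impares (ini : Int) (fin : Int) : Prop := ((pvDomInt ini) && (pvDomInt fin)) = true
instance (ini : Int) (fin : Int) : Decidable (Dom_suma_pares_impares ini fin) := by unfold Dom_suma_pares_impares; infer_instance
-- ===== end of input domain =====

-- B replaces the per-element parity-testing loop by two stride-2 ranges (evens/odds) summed directly.

-- ===== PORT A =====
def suma_pares_impares (ini : Int) (fin : Int) : List Int × List Int × Int × Int :=
  (PySem.List.pyRange ini (fin + 1) 1).foldl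
    (fun (st : List Int × List Int × Int × Int) (i : Int) =>
      if PySem.Int.mod i 2 == 0 then (st.1 ++ [i], st.2.1, st.2.2.1 + i, st.2.2.2)
      else (st.1, st.2.1 ++ [i], st.2.2.1, st.2.2.2 + i))
    ([], [], 0, 0)

-- ===== PORT B =====
def suma_pares_impares_alt (ini : Int) (fin : Int) : List Int × List Int × Int × Int :=
  let startEven : Int := if PySem.Int.mod ini 2 == 0 then ini else ini + 1
  let startOdd : Int := if PySem.Int.mod ini 2 == 0 then ini + 1 else ini
  let pares := PySem.List.pyRange startEven (fin + 1) 2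
  let impares := PySem.List.pyRange startOdd (fin + 1) 2
  (pares, impares, pares.sum, impares.sum)

-- ===== PRECONDITION & SPEC =====
def Spec_suma_pares_impares (ini : Int) (fin : Int) (out : List Int × List Int × Int × Int) : Prop := out = suma_pares_impares_alt ini fin
instance (ini : Int) (fin : Int) (out : List Int × List Int × Int × Int) : Decidable (Spec_suma_pares_impares ini fin out) := by unfold Spec_suma_pares_impares; infer_instance

-- ===== CLAIM (what is proved, stated in full; the proofs are below) =====
def Claim_equal_suma_pares_impares : Prop := ∀ (ini : Int) (fin : Int), Dom_suma_pares_impares ini fin → Spec_suma_pares_impares ini fin (suma_pares_impares ini fin)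

-- ===== LEMMAS AND PROOFS =====

-- first even (resp. odd) value ≥ a
def pvFe (a : Int) : Int := if PySem.Int.mod a 2 == 0 then a else a + 1
def pvFo (a : Int) : Int := if PySem.Int.mod a 2 == 0 then a + 1 else a

lemma pvMod_two (a : Int) : (PySem.Int.mod a 2 == 0) = decide (2 ∣ a) := by
  by_cases h : 2 ∣ a
  · simp [h]
  · simp only [h, decide_false]
    have : PySem.Int.mod a 2 ≠ 0 := fun hc => h ((PySem.Int.mod_eq_zero_iff_dvd a 2).mp hc)
    simpa using this

lemma pvRange2_nil (a b : Int) (h : b ≤ a) : PySem.List.pyRange a b 2 = [] := by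
  rw [PySem.List.pyRange_of_pos a b (by norm_num)]
  simp [show ¬ a < b by omega]

lemma pvRange2_cons (a b : Int) (h : a < b) : PySem.List.pyRange a b 2 = a :: PySem.List.pyRange (a + 2) b 2 := by
  rw [PySem.List.pyRange_of_pos a b (by norm_num), PySem.List.pyRange_of_pos (a + 2) b (by norm_num)]
  have hn : (if a < b then ((b - a + 2 - 1) / 2).toNat else 0)
      = (if a + 2 < b then ((b - (a + 2) + 2 - 1) / 2).toNat else 0) + 1 := by
    by_cases h2 : a + 2 < b <;> simp [h, h2] <;> omega
  rw [hn, List.range_succ_eq_map, List.map_cons, List.map_map]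
  refine congrArg₂ _ (by ring) (List.map_congr_left fun k _ => ?_)
  simp; ring

lemma pvLoop (n : Nat) : ∀ (a b : Int), (b - a).toNat = n → ∀ (p q : List Int) (sp si : Int),
    (PySem.List.pyRange a b 1).foldl
      (fun (st : List Int × List Int × Int × Int) (i : Int) =>
        if PySem.Int.mod i 2 == 0 then (st.1 ++ [i], st.2.1, st.2.2.1 + i, st.2.2.2)
        else (st.1, st.2.1 ++ [i], st.2.2.1, st.2.2.2 + i))
      (p, q, sp, si)
    = (p ++ PySem.List.pyRange (pvFe a) b 2, q ++ PySem.List.pyRange (pvFo a) b 2,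
       sp + (PySem.List.pyRange (pvFe a) b 2).sum, si + (PySem.List.pyRange (pvFo a) b 2).sum) := by
  induction n with
  | zero =>
    intro a b h p q sp si
    have hba : b ≤ a := by omega
    have hfe : b ≤ pvFe a := by unfold pvFe; split <;> omega
    have hfo : b ≤ pvFo a := by unfold pvFo; split <;> omega
    rw [PySem.List.pyRange_one_eq_nil hba, pvRange2_nil _ _ hfe, pvRange2_nil _ _ hfo]
    simp
  | succ n ih =>
    intro a b h p q sp si
    have hab : a < b := by omega
    rw [PySem.List.pyRange_one_cons hab, List.foldl_cons]
    have h' : (b - (a + 1)).toNat = n := by omega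
    by_cases hd : 2 ∣ a
    · have hm : (PySem.Int.mod a 2 == 0) = true := by rw [pvMod_two]; simpa using hd
      have hd1 : ¬ 2 ∣ (a + 1) := by omega
      have hm1 : (PySem.Int.mod (a + 1) 2 == 0) = false := by rw [pvMod_two]; simpa using hd1
      simp only [hm, if_true]
      rw [ih (a + 1) b h']
      have e1 : pvFe a = a := by unfold pvFe; rw [hm]; rfl
      have e2 : pvFe (a + 1) = a + 2 := by unfold pvFe; rw [hm1]; simp; ring
      have e3 : pvFo a = a + 1 := by unfold pvFo; rw [hm]; rfl
      have e4 : pvFo (a + 1) = a + 1 := by unfold pvFo; rw [hm1]; simp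
      rw [e1, e2, e3, e4, pvRange2_cons a b hab]
      simp [List.append_assoc, add_assoc]
    · have hm : (PySem.Int.mod a 2 == 0) = false := by rw [pvMod_two]; simpa using hd
      have hd1 : 2 ∣ (a + 1) := by omega
      have hm1 : (PySem.Int.mod (a + 1) 2 == 0) = true := by rw [pvMod_two]; simpa using hd1
      simp only [hm, Bool.false_eq_true, if_false]
      rw [ih (a + 1) b h']
      have e1 : pvFe a = a + 1 := by unfold pvFe; rw [hm]; rfl
      have e2 : pvFe (a + 1) = a + 1 := by unfold pvFe; rw [hm1]; rfl
      have e3 : pvFo a = a := by unfold pvFo; rw [hm]; rfl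
      have e4 : pvFo (a + 1) = a + 2 := by unfold pvFo; rw [hm1]; simp; ring
      rw [e1, e2, e3, e4, pvRange2_cons a b hab]
      simp [List.append_assoc, add_assoc]

-- ===== VERDICT (by name: the statement is the Claim_ definition above) =====
theorem suma_pares_impares_spec : Claim_equal_suma_pares_impares := by
  intro ini fin _
  unfold Spec_suma_pares_impares suma_pares_impares suma_pares_impares_alt
  rw [pvLoop (fin + 1 - ini).toNat ini (fin + 1) rfl]
  simp [pvFe, pvFo]
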